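-- pv_equiv track=rewrite | github.com/BrunoGomesCoelho/AdvancedAlgortihms | week2/ex3.py | recurse_solve
-- ===== SOURCE A (Python) =====
-- def recurse_solve(stack, toy, valid):
--     count = 0
--     while stack:
--         num = stack.pop()
--         if count >= -toy:
--             return False
--         elif num == -toy:
--             return valid
--         elif num < 0:
--             count += -num
--             valid = recurse_solve(stack, num, valid)
--         # If we reach this, we hava a invalid number
--         else:
--             return False
--     return valid
-- ===== SOURCE B (Python) =====
-- def recurse_solve(stack, toy, valid):
--     # Iterative version: explicit frame stack (front = innermost frame) instead of recursion.
--     frames = [(toy, 0)]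
--     while frames:
--         ftoy, fcount = frames[0]
--         if not stack:
--             frames.pop(0)
--         else:
--             num = stack.pop()
--             if fcount >= -ftoy:
--                 valid = False
--                 frames.pop(0)
--             elif num == -ftoy:
--                 frames.pop(0)
--             elif num < 0:
--                 frames[0] = (ftoy, fcount + (-num))
--                 frames.insert(0, (num, 0))
--             else:
--                 valid = False
--                 frames.pop(0)
--     return valid
-- ===== Notes on version B (the rewrite author's own statement) =====
-- stated objective: alternative
-- what changed: Replaced A's self-recursive call per negative number with a single iterative while-loop over an explicit frame stack of (toy, count) pairs and one shared valid flag.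
import Mathlib
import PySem

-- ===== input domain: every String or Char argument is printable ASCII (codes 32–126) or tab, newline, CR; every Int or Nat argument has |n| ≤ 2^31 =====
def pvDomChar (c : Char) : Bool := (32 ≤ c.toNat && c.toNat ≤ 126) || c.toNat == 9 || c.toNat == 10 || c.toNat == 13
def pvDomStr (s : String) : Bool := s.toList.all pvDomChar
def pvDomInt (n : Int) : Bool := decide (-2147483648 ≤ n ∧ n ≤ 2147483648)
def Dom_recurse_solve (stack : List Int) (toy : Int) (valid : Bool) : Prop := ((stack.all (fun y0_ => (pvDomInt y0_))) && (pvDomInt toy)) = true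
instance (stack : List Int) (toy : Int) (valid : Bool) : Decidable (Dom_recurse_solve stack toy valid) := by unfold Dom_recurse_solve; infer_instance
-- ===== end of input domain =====

-- B replaces A's recursion by one iterative loop over an explicit frame stack ('alternative'
-- decomposition, same cost); equivalence is about the RETURN value (both pop the argument list
-- identically in Python).

-- ===== PORT A =====
-- A pops from the Python list, so the recursive helper must also yield the remaining list;
-- the subtype bound (result list no longer than the input) is what justifies termination.
def recurse_solve_go (stack : List Int) (toy : Int) (valid : Bool) (count : Int) :
    { p : List Int × Bool // p.1.length ≤ stack.length } :=
  match h : PySem.List.pop? stack (-1) with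
  | none => ⟨(stack, valid), le_refl _⟩                      -- while-condition false: return valid
  | some (num, rest) =>
    have hlen : rest.length + 1 = stack.length := PySem.List.length_of_pop?_eq_some stack h
    if count ≥ -toy then ⟨(rest, false), hlen ▸ Nat.le_succ rest.length⟩       -- return False
    else if num = -toy then ⟨(rest, valid), hlen ▸ Nat.le_succ rest.length⟩    -- return valid
    else if num < 0 then
      -- count += -num; valid = recurse_solve(stack, num, valid); continue the loop
      let r1 := recurse_solve_go rest num valid 0
      let r2 := recurse_solve_go r1.1.1 toy r1.1.2 (count + (-num))
      ⟨r2.1, le_trans r2.2 (le_trans r1.2 (hlen ▸ Nat.le_succ rest.length))⟩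
    else ⟨(rest, false), hlen ▸ Nat.le_succ rest.length⟩     -- invalid number: return False
termination_by stack.length
decreasing_by
  · exact hlen ▸ Nat.lt_succ_self rest.length
  · exact Nat.lt_of_le_of_lt r1.2 (hlen ▸ Nat.lt_succ_self rest.length)

def recurse_solve (stack : List Int) (toy : Int) (valid : Bool) : Bool :=
  (recurse_solve_go stack toy valid 0).1.2

-- ===== PORT B =====
-- frames: innermost frame at the head, each frame is (frame_toy, frame_count); one valid flag.
def recurse_solve_alt_go (stack : List Int) (frames : List (Int × Int)) (valid : Bool) : Bool :=
  match frames with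
  | [] => valid                                              -- while frames: done
  | (ftoy, fcount) :: fs =>
    match h : PySem.List.pop? stack (-1) with
    | none => recurse_solve_alt_go stack fs valid            -- stack empty: pop the frame
    | some (num, rest) =>
      have _hlen : rest.length + 1 = stack.length := PySem.List.length_of_pop?_eq_some stack h
      if fcount ≥ -ftoy then recurse_solve_alt_go rest fs false
      else if num = -ftoy then recurse_solve_alt_go rest fs valid
      else if num < 0 then
        recurse_solve_alt_go rest ((num, 0) :: (ftoy, fcount + (-num)) :: fs) valid
      else recurse_solve_alt_go rest fs false
termination_by 2 * stack.length + frames.length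
decreasing_by
  all_goals simp only [List.length_cons]
  all_goals omega

def recurse_solve_alt (stack : List Int) (toy : Int) (valid : Bool) : Bool :=
  recurse_solve_alt_go stack [(toy, 0)] valid

-- ===== PRECONDITION & SPEC =====
def Spec_recurse_solve (stack : List Int) (toy : Int) (valid : Bool) (out : Bool) : Prop := out = recurse_solve_alt stack toy valid
instance (stack : List Int) (toy : Int) (valid : Bool) (out : Bool) : Decidable (Spec_recurse_solve stack toy valid out) := by unfold Spec_recurse_solve; infer_instance

-- ===== CLAIM (what is proved, stated in full; the proofs are below) =====
def Claim_equal_recurse_solve : Prop := ∀ (stack : List Int) (toy : Int) (valid : Bool), Dom_recurse_solve stack toy valid → Spec_recurse_solve stack toy valid (recurse_solve stack toy valid)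

-- ===== LEMMAS AND PROOFS =====

-- One frame of B simulates one recursive call of A: running B's loop with (toy, count) on top of
-- the frame stack equals finishing A's call and continuing with the remaining frames.
theorem recurse_solve_go_frames (stack : List Int) (toy : Int) (valid : Bool) (count : Int) :
    ∀ fs : List (Int × Int),
      recurse_solve_alt_go stack ((toy, count) :: fs) valid
        = recurse_solve_alt_go (recurse_solve_go stack toy valid count).1.1 fs
            (recurse_solve_go stack toy valid count).1.2 := by
  fun_induction recurse_solve_go stack toy valid count with
  | case1 stack toy valid count h =>
    intro fs
    rw [recurse_solve_alt_go.eq_def]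
    split <;> simp_all
    all_goals split <;> simp_all
  | case2 stack toy valid count num rest h hlen hc =>
    intro fs
    rw [recurse_solve_alt_go.eq_def]
    split <;> simp_all
    all_goals split <;> simp_all
  | case3 stack toy valid count rest hc h hlen =>
    intro fs
    rw [recurse_solve_alt_go.eq_def]
    split <;> simp_all
    all_goals split <;> simp_all
  | case4 stack toy valid count num rest h hlen hc hne hneg r1 r2 ih3 ih2 ih1 =>
    intro fs
    rw [recurse_solve_alt_go.eq_def]
    split
    · simp_all
    · rename_i frames ftoy fcount fs' heq
      simp only [List.cons.injEq, Prod.mk.injEq] at heq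
      obtain ⟨⟨rfl, rfl⟩, rfl⟩ := heq
      split
      · simp_all
      · rename_i num' rest' heq2
        rw [h] at heq2
        simp only [Option.some.injEq, Prod.mk.injEq] at heq2
        obtain ⟨rfl, rfl⟩ := heq2
        rw [if_neg hc, if_neg hne, if_pos hneg]
        rw [ih3]
        exact ih1 fs
  | case5 stack toy valid count num rest h hlen hc hne hneg =>
    intro fs
    rw [recurse_solve_alt_go.eq_def]
    split <;> simp_all
    all_goals split <;> simp_all

-- ===== VERDICT (by name: the statement is the Claim_ definition above) =====
theorem recurse_solve_spec : Claim_equal_recurse_solve := by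
  intro stack toy valid _
  unfold Spec_recurse_solve recurse_solve recurse_solve_alt
  rw [recurse_solve_go_frames]
  rw [recurse_solve_alt_go]
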